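-- pv_equiv track=rewrite | github.com/vjain1999/rx-media-manager | run_full_system_golden.py | add_review_flags
-- ===== SOURCE A (Python) =====
-- from typing import List, Dict, Tuple, Union
--
-- def add_review_flags(results: List[Dict]) -> List[Dict]:
--     """Add a 'review' flag when the same business_id has conflicting found handles across stores.
--
--     Rule: If within a given business_id there exist >1 distinct, non-empty instagram_handle values
--     found by the system, mark all rows with that business_id as 'FLAG' in a new 'review' column.
--     Else, set 'review' to an empty string.
--     """
--     # Normalize handles and group by business_id
--     business_id_to_handles: Dict[str, set] = {}
--     for r in results:
--         business_id = (r.get('business_id') or '').strip()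
--         handle = (r.get('instagram_handle') or '').strip().lower()
--         if business_id:
--             if business_id not in business_id_to_handles:
--                 business_id_to_handles[business_id] = set()
--             if handle:
--                 business_id_to_handles[business_id].add(handle)
--
--     # Determine which business_ids are conflicting
--     conflicting_business_ids = {bid for bid, handles in business_id_to_handles.items() if len(handles) > 1}
--
--     # Annotate results with 'review'
--     for r in results:
--         bid = (r.get('business_id') or '').strip()
--         r['review'] = 'FLAG' if bid in conflicting_business_ids else ''
--
--     return results
-- ===== SOURCE B (Python) =====
-- def add_review_flags(results):
--     """Same rule as A, but with no grouping structure: normalize rows once into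
--     (bid, handle) pairs, then detect a conflicting bid by a direct pairwise scan
--     of the list for a same-bid row carrying a different non-empty handle."""
--     pairs = [((r.get('business_id') or '').strip(),
--               (r.get('instagram_handle') or '').strip().lower()) for r in results]
--     conflicting = set()
--     for b1, h1 in pairs:
--         if b1 and h1 and b1 not in conflicting:
--             if any(b2 == b1 and h2 and h2 != h1 for b2, h2 in pairs):
--                 conflicting.add(b1)
--     for r, (bid, _h) in zip(results, pairs):
--         r['review'] = 'FLAG' if bid in conflicting else ''
--     return results
-- ===== Notes on version B (the rewrite author's own statement) =====
-- stated objective: alternative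
-- what changed: B drops A's hash-grouping entirely (no dict of per-id handle sets, no derived conflicting-id set): it normalizes the rows once into a (business_id, handle) pair list and decides each id's conflict by a direct pairwise scan of that list for a same-id entry with a different non-empty handle.
import Mathlib
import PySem

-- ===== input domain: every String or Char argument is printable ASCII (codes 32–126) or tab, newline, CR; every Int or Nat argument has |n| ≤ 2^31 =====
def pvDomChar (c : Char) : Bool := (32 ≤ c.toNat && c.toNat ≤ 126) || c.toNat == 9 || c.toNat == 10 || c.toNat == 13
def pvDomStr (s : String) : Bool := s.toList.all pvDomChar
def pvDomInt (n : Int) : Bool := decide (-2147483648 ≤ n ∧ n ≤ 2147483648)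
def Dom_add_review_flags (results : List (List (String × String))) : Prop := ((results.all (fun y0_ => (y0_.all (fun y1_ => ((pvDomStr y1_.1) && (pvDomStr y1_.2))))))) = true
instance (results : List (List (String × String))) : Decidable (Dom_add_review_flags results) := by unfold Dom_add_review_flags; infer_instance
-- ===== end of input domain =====

-- B replaces A's hash-grouping (dict of handle-sets + derived conflicting-id set) by a direct
-- pairwise scan: normalize rows once into (bid, handle) pairs, then a bid conflicts iff the pair
-- list contains a same-bid entry with a different non-empty handle. Objective 'alternative'.
-- A mutates each row in place (adds/overwrites 'review'); the equivalence proved here is about the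
-- RETURN value (the annotated rows), and B performs the same mutation in Python.

-- ===== PORT A =====
-- (business_id normalization and handle normalization, identical lines in both Pythons)
def pvBid (r : PySem.Dict String String) : String :=
  PySem.Str.strip ((r.get? "business_id").getD "")

def pvHandle (r : PySem.Dict String String) : String :=
  PySem.Str.lower (PySem.Str.strip ((r.get? "instagram_handle").getD ""))

-- grouping update of A's first 'for r in results' loop, on the already-normalized values
def pvUpdateA (m : PySem.Dict String (PySem.Set String)) (bid handle : String) :
    PySem.Dict String (PySem.Set String) :=
  if bid ≠ "" then
    let m1 := if m.contains bid then m else m.insert bid PySem.Set.empty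
    if handle ≠ "" then m1.modify bid PySem.Set.empty (fun s => PySem.Set.add s handle) else m1
  else m

-- body of A's first 'for r in results' loop
def pvStepA (m : PySem.Dict String (PySem.Set String)) (row : List (String × String)) :
    PySem.Dict String (PySem.Set String) :=
  let r := PySem.Dict.ofList row
  pvUpdateA m (pvBid r) (pvHandle r)

def add_review_flags (results : List (List (String × String))) : List (List (String × String)) :=
  let business_id_to_handles := results.foldl pvStepA PySem.Dict.empty
  let conflicting_business_ids : PySem.Set String :=
    PySem.Set.ofList
      (((business_id_to_handles.items.filter (fun p => PySem.Set.len p.2 > 1)).map (fun p => p.1)))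
  results.map (fun row =>
    let r := PySem.Dict.ofList row
    let bid := pvBid r
    (r.insert "review"
      (if PySem.Set.contains conflicting_business_ids bid then "FLAG" else "")).items)

-- ===== PORT B =====
-- B's one-shot normalization of a row into its (bid, handle) pair
def pvNorm (row : List (String × String)) : String × String :=
  let r := PySem.Dict.ofList row
  (pvBid r, pvHandle r)

-- B's inner 'any' predicate: a same-bid pair with a different non-empty handle
def pvInner (p q : String × String) : Bool := q.1 == p.1 && q.2 != "" && q.2 != p.2

-- body of B's conflict-collecting loop over the pair list
def pvStepB (pairs : List (String × String)) (c : PySem.Set String) (p : String × String) :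
    PySem.Set String :=
  if p.1 ≠ "" ∧ p.2 ≠ "" ∧ ¬ PySem.Set.contains c p.1 then
    if pairs.any (pvInner p) then PySem.Set.add c p.1 else c
  else c

def add_review_flags_alt (results : List (List (String × String))) : List (List (String × String)) :=
  let pairs := results.map pvNorm
  let conflicting := pairs.foldl (pvStepB pairs) PySem.Set.empty
  (results.zip pairs).map (fun x =>
    ((PySem.Dict.ofList x.1).insert "review"
      (if PySem.Set.contains conflicting x.2.1 then "FLAG" else "")).items)

-- ===== PRECONDITION & SPEC =====
def Spec_add_review_flags (results : List (List (String × String))) (out : List (List (String × String))) : Prop := out = add_review_flags_alt results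
instance (results : List (List (String × String))) (out : List (List (String × String))) : Decidable (Spec_add_review_flags results out) := by unfold Spec_add_review_flags; infer_instance

-- ===== CLAIM (what is proved, stated in full; the proofs are below) =====
def Claim_equal_add_review_flags : Prop := ∀ (results : List (List (String × String))), Dom_add_review_flags results → Spec_add_review_flags results (add_review_flags results)

-- ===== LEMMAS AND PROOFS =====

-- the conflict criterion both programs compute, as a predicate on the normalized pair list
def pvConf (pairs : List (String × String)) (bid : String) : Prop :=
  bid ≠ "" ∧ ∃ p ∈ pairs, p.1 = bid ∧ p.2 ≠ "" ∧ ∃ q ∈ pairs, q.1 = bid ∧ q.2 ≠ "" ∧ q.2 ≠ p.2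

-- invariant describing one entry of A's grouping dict after processing 'done'
def pvA (bid : String) : Option (PySem.Set String) → List (String × String) → Prop
  | none, done => bid = "" ∨ ∀ p ∈ done, p.1 ≠ bid
  | some s, done => bid ≠ "" ∧ s.Nodup ∧ ∀ h, h ∈ s ↔ h ≠ "" ∧ (bid, h) ∈ done

lemma pvModify_eq_insert (d : PySem.Dict String (PySem.Set String)) (k : String)
    (f : PySem.Set String → PySem.Set String) :
    d.modify k PySem.Set.empty f = d.insert k (f (d.getD k PySem.Set.empty)) := rfl

lemma pvA_update (b h : String) (m : PySem.Dict String (PySem.Set String))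
    (done : List (String × String)) (hinv : ∀ bid, pvA bid (m.get? bid) done) :
    ∀ bid, pvA bid ((pvUpdateA m b h).get? bid) (done ++ [(b, h)]) := by
  intro bid
  unfold pvUpdateA
  by_cases hb : b = ""
  · rw [if_neg (not_not_intro hb)]
    have hi := hinv bid
    cases hm : m.get? bid with
    | none =>
      rw [hm] at hi
      by_cases hbid : bid = ""
      · exact Or.inl hbid
      · rcases hi with h1 | h1
        · exact absurd h1 hbid
        · refine Or.inr fun p hp => ?_
          rcases List.mem_append.mp hp with hp | hp
          · exact h1 p hp
          · rcases List.mem_singleton.mp hp with rfl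
            intro hc
            apply hbid
            rw [← hc]
            exact hb
    | some s =>
      rw [hm] at hi
      obtain ⟨hbid, hnd, hch⟩ := hi
      refine ⟨hbid, hnd, fun h' => ?_⟩
      rw [hch h']
      constructor
      · rintro ⟨hne, hmem⟩; exact ⟨hne, List.mem_append.mpr (Or.inl hmem)⟩
      · rintro ⟨hne, hmem⟩
        rcases List.mem_append.mp hmem with hmem | hmem
        · exact ⟨hne, hmem⟩
        · rcases List.mem_singleton.mp hmem with heq
          exact absurd ((congrArg Prod.fst heq).trans hb) hbid
  · rw [if_pos hb]
    -- the state after the 'bid not in dict → fresh empty set' line, at key b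
    have key : ∃ s0 : PySem.Set String,
        ((if m.contains b then m else m.insert b PySem.Set.empty).get? b = some s0) ∧
        s0.Nodup ∧ (∀ h', h' ∈ s0 ↔ h' ≠ "" ∧ (b, h') ∈ done) := by
      by_cases hc : m.contains b
      · rw [if_pos hc]
        cases hm : m.get? b with
        | none =>
          exact absurd ((PySem.Dict.get?_eq_none_iff_contains m b).mp hm)
            (by simp [hc])
        | some s =>
          have hi := hinv b
          rw [hm] at hi
          exact ⟨s, rfl, hi.2.1, hi.2.2⟩
      · rw [if_neg hc]
        have hi := hinv b
        rw [(PySem.Dict.get?_eq_none_iff_contains m b).mpr (by simpa using hc)] at hi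
        rcases hi with h1 | h1
        · exact absurd h1 hb
        · refine ⟨PySem.Set.empty, by rw [PySem.Dict.get?_insert]; simp, by simp [PySem.Set.empty],
            fun h' => ?_⟩
          simp only [PySem.Set.empty, List.not_mem_nil, false_iff]
          rintro ⟨-, hmem⟩
          exact h1 (b, h') hmem rfl
    obtain ⟨s0, hs0, hs0nd, hs0ch⟩ := key
    -- untouched keys keep their old entry
    have untouched : ∀ bid', bid' ≠ b →
        ((if m.contains b then m else m.insert b PySem.Set.empty).get? bid') = m.get? bid' := by
      intro bid' hne
      by_cases hc : m.contains b
      · rw [if_pos hc]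
      · rw [if_neg hc, PySem.Dict.get?_insert, if_neg hne]
    by_cases hbid : bid = b
    · subst hbid
      by_cases hh : h = ""
      · rw [if_neg (not_not_intro hh), hs0]
        refine ⟨hb, hs0nd, fun h' => ?_⟩
        rw [hs0ch h']
        constructor
        · rintro ⟨hne, hmem⟩; exact ⟨hne, List.mem_append.mpr (Or.inl hmem)⟩
        · rintro ⟨hne, hmem⟩
          rcases List.mem_append.mp hmem with hmem | hmem
          · exact ⟨hne, hmem⟩
          · rcases List.mem_singleton.mp hmem with heq
            exact absurd ((congrArg Prod.snd heq).trans hh) hne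
      · rw [if_pos hh, pvModify_eq_insert, PySem.Dict.get?_insert, if_pos rfl,
          PySem.Dict.getD_eq_get?_getD, hs0]
        simp only [Option.getD_some]
        refine ⟨hb, PySem.Set.nodup_add _ _ hs0nd, fun h' => ?_⟩
        rw [PySem.Set.mem_add]
        constructor
        · rintro (hmem | rfl)
          · obtain ⟨hne, hd⟩ := (hs0ch h').mp hmem
            exact ⟨hne, List.mem_append.mpr (Or.inl hd)⟩
          · exact ⟨hh, List.mem_append.mpr (Or.inr (List.mem_singleton.mpr rfl))⟩
        · rintro ⟨hne, hmem⟩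
          rcases List.mem_append.mp hmem with hmem | hmem
          · exact Or.inl ((hs0ch h').mpr ⟨hne, hmem⟩)
          · rcases List.mem_singleton.mp hmem with heq
            exact Or.inr (congrArg Prod.snd heq)
    · -- a key this row does not touch
      have hres : ((if h ≠ "" then
            (if m.contains b then m else m.insert b PySem.Set.empty).modify b PySem.Set.empty
              (fun s => PySem.Set.add s h)
          else (if m.contains b then m else m.insert b PySem.Set.empty)).get? bid) = m.get? bid := by
        split
        · rw [pvModify_eq_insert, PySem.Dict.get?_insert, if_neg hbid, untouched bid hbid]
        · exact untouched bid hbid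
      rw [hres]
      have hi := hinv bid
      cases hm : m.get? bid with
      | none =>
        rw [hm] at hi
        rcases hi with h1 | h1
        · exact Or.inl h1
        · refine Or.inr fun p hp => ?_
          rcases List.mem_append.mp hp with hp | hp
          · exact h1 p hp
          · rcases List.mem_singleton.mp hp with rfl
            exact fun hc => hbid hc.symm
      | some s =>
        rw [hm] at hi
        obtain ⟨hbne, hnd, hch⟩ := hi
        refine ⟨hbne, hnd, fun h' => ?_⟩
        rw [hch h']
        constructor
        · rintro ⟨hne, hmem⟩; exact ⟨hne, List.mem_append.mpr (Or.inl hmem)⟩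
        · rintro ⟨hne, hmem⟩
          rcases List.mem_append.mp hmem with hmem | hmem
          · exact ⟨hne, hmem⟩
          · rcases List.mem_singleton.mp hmem with heq
            exact absurd (congrArg Prod.fst heq) hbid
      
lemma pvA_fold (l : List (String × String)) :
    ∀ (m : PySem.Dict String (PySem.Set String)) (done : List (String × String)),
    (∀ bid, pvA bid (m.get? bid) done) →
    ∀ bid, pvA bid ((l.foldl (fun m p => pvUpdateA m p.1 p.2) m).get? bid) (done ++ l) := by
  induction l with
  | nil => intro m done h bid; simpa using h bid
  | cons p t ih =>
    intro m done h bid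
    rw [List.foldl_cons]
    have h2 := pvA_update p.1 p.2 m done h
    have := ih (pvUpdateA m p.1 p.2) (done ++ [p]) h2 bid
    simpa using this

-- keys of A's grouping dict stay duplicate-free
lemma pvNodupA_update (m : PySem.Dict String (PySem.Set String)) (bid handle : String)
    (h : m.keys.Nodup) : (pvUpdateA m bid handle).keys.Nodup := by
  unfold pvUpdateA
  simp only []
  split_ifs <;>
    first
      | exact h
      | exact PySem.Dict.nodup_keys_insert _ _ _ h
      | (rw [pvModify_eq_insert]; exact PySem.Dict.nodup_keys_insert _ _ _ h)
      | (rw [pvModify_eq_insert];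
         exact PySem.Dict.nodup_keys_insert _ _ _ (PySem.Dict.nodup_keys_insert _ _ _ h))

lemma pvNodupA (l : List (List (String × String))) :
    ∀ (m : PySem.Dict String (PySem.Set String)), m.keys.Nodup → (l.foldl pvStepA m).keys.Nodup := by
  induction l with
  | nil => intro m h; exact h
  | cons row rest ih =>
    intro m h
    rw [List.foldl_cons]
    exact ih (pvStepA m row) (pvNodupA_update m _ _ h)

-- membership in A's derived conflicting set, in terms of the dict
lemma pvA_contains (m : PySem.Dict String (PySem.Set String)) (hnd : m.keys.Nodup) (bid : String) :
    (PySem.Set.contains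
      (PySem.Set.ofList ((m.items.filter (fun p => PySem.Set.len p.2 > 1)).map (fun p => p.1))) bid)
      = true ↔ ∃ s, m.get? bid = some s ∧ 1 < s.length := by
  rw [PySem.Set.contains_iff, PySem.Set.mem_ofList]
  simp only [List.mem_map, List.mem_filter]
  constructor
  · rintro ⟨⟨k, v⟩, ⟨hpm, hlen⟩, hfst⟩
    cases hfst
    refine ⟨v, PySem.Dict.get?_of_mem_items m hpm hnd, ?_⟩
    simpa [PySem.Set.len] using hlen
  · rintro ⟨s, hs, hlen⟩
    exact ⟨(bid, s), ⟨PySem.Dict.mem_items_of_get?_eq_some m hs,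
      by simpa [PySem.Set.len] using hlen⟩, rfl⟩

lemma pvTwo_length {α : Type} (s : List α) (a b : α) (ha : a ∈ s) (hb : b ∈ s) (hne : a ≠ b) :
    1 < s.length := by
  match s with
  | [] => cases ha
  | [x] =>
    rcases List.mem_singleton.mp ha with rfl
    rcases List.mem_singleton.mp hb with rfl
    exact absurd rfl hne
  | x :: y :: t => simp

-- A's flag for bid ↔ pvConf
lemma pvA_iff_conf (results : List (List (String × String))) (bid : String) :
    (PySem.Set.contains
      (PySem.Set.ofList
        ((((results.foldl pvStepA PySem.Dict.empty).items.filter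
            (fun p => PySem.Set.len p.2 > 1)).map (fun p => p.1)))) bid) = true
      ↔ pvConf (results.map pvNorm) bid := by
  set m := results.foldl pvStepA PySem.Dict.empty with hm
  have hnd : m.keys.Nodup := pvNodupA results PySem.Dict.empty PySem.Dict.nodup_keys_empty
  have hfold : m = (results.map pvNorm).foldl (fun m p => pvUpdateA m p.1 p.2) PySem.Dict.empty := by
    rw [hm, List.foldl_map]; rfl
  have hinv : ∀ b, pvA b (m.get? b) (results.map pvNorm) := by
    rw [hfold]
    have := pvA_fold (results.map pvNorm) PySem.Dict.empty []
      (by intro b; rw [PySem.Dict.get?_empty]; exact Or.inr (by simp))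
    simpa using this
  rw [pvA_contains m hnd bid]
  constructor
  · rintro ⟨s, hs, hlen⟩
    have h1 := hinv bid
    rw [hs] at h1
    obtain ⟨hbid, hnodup, hch⟩ := h1
    match s, hlen, hnodup, hch with
    | x :: y :: t, _, hnodup, hch =>
      have hxy : x ≠ y := by
        intro h; exact (List.nodup_cons.mp hnodup).1 (h ▸ List.mem_cons_self ..)
      have hx := (hch x).mp (List.mem_cons_self ..)
      have hy := (hch y).mp (List.mem_cons.mpr (Or.inr (List.mem_cons_self ..)))
      exact ⟨hbid, (bid, x), hx.2, rfl, hx.1, (bid, y), hy.2, rfl, hy.1, fun hxe => hxy hxe.symm⟩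
  · rintro ⟨hbid, p, hp, hp1, hp2, q, hq, hq1, hq2, hqp⟩
    have h1 := hinv bid
    cases hs : m.get? bid with
    | none =>
      rw [hs] at h1
      rcases h1 with h1 | h1
      · exact absurd h1 hbid
      · exact absurd hp1 (h1 p hp)
    | some s =>
      rw [hs] at h1
      obtain ⟨_, hnodup, hch⟩ := h1
      have hps : p.2 ∈ s := (hch p.2).mpr ⟨hp2, by rw [← hp1]; exact hp⟩
      have hqs : q.2 ∈ s := (hch q.2).mpr ⟨hq2, by rw [← hq1]; exact hq⟩
      exact ⟨s, rfl, pvTwo_length s q.2 p.2 hqs hps hqp⟩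

-- B's inner any ↔ the existential it tests
lemma pvAny_iff (pairs : List (String × String)) (p : String × String) :
    pairs.any (pvInner p) = true ↔ ∃ q ∈ pairs, q.1 = p.1 ∧ q.2 ≠ "" ∧ q.2 ≠ p.2 := by
  simp [pvInner, List.any_eq_true, and_assoc]

-- one step of B's conflict loop
lemma pvStepB_contains (pairs : List (String × String)) (c : PySem.Set String)
    (p : String × String) (bid : String) :
    PySem.Set.contains (pvStepB pairs c p) bid = true ↔
      PySem.Set.contains c bid = true ∨
        (p.1 = bid ∧ bid ≠ "" ∧ p.2 ≠ "" ∧ pairs.any (pvInner p) = true) := by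
  unfold pvStepB
  by_cases hg : p.1 ≠ "" ∧ p.2 ≠ "" ∧ ¬ PySem.Set.contains c p.1
  · rw [if_pos hg]
    by_cases hany : pairs.any (pvInner p) = true
    · rw [if_pos hany, PySem.Set.contains_iff, PySem.Set.mem_add, ← PySem.Set.contains_iff]
      constructor
      · rintro (h | rfl)
        · exact Or.inl h
        · exact Or.inr ⟨rfl, hg.1, hg.2.1, hany⟩
      · rintro (h | ⟨rfl, _⟩)
        · exact Or.inl h
        · exact Or.inr rfl
    · rw [if_neg hany]
      constructor
      · exact Or.inl
      · rintro (h | ⟨_, _, _, h⟩)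
        · exact h
        · exact absurd h hany
  · rw [if_neg hg]
    constructor
    · exact Or.inl
    · rintro (h | ⟨rfl, hbid, hp2, hany⟩)
      · exact h
      · -- guard failed though p.1 = bid ≠ "" and p.2 ≠ "": so bid was already in c
        by_cases hc : PySem.Set.contains c p.1
        · exact hc
        · exact absurd ⟨hbid, hp2, hc⟩ hg

-- B's whole conflict loop
lemma pvFoldB_contains (pairs : List (String × String)) :
    ∀ (l : List (String × String)) (c : PySem.Set String) (bid : String),
    PySem.Set.contains (l.foldl (pvStepB pairs) c) bid = true ↔
      PySem.Set.contains c bid = true ∨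
        ∃ p ∈ l, p.1 = bid ∧ bid ≠ "" ∧ p.2 ≠ "" ∧ pairs.any (pvInner p) = true := by
  intro l
  induction l with
  | nil => intro c bid; simp
  | cons p t ih =>
    intro c bid
    rw [List.foldl_cons, ih, pvStepB_contains]
    constructor
    · rintro ((h | h) | ⟨q, hq, h⟩)
      · exact Or.inl h
      · exact Or.inr ⟨p, List.mem_cons_self .., h⟩
      · exact Or.inr ⟨q, List.mem_cons.mpr (Or.inr hq), h⟩
    · rintro (h | ⟨q, hq, h⟩)
      · exact Or.inl (Or.inl h)
      · rcases List.mem_cons.mp hq with rfl | hq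
        · exact Or.inl (Or.inr h)
        · exact Or.inr ⟨q, hq, h⟩

-- B's flag for bid ↔ pvConf
lemma pvB_iff_conf (pairs : List (String × String)) (bid : String) :
    PySem.Set.contains (pairs.foldl (pvStepB pairs) PySem.Set.empty) bid = true ↔
      pvConf pairs bid := by
  rw [pvFoldB_contains]
  constructor
  · rintro (h | ⟨p, hp, hp1, hbid, hp2, hany⟩)
    · simp [PySem.Set.empty] at h
    · rcases (pvAny_iff pairs p).mp hany with ⟨q, hq, hq1, hq2, hqp⟩
      exact ⟨hbid, p, hp, hp1, hp2, q, hq, hp1 ▸ hq1, hq2, hqp⟩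
  · rintro ⟨hbid, p, hp, hp1, hp2, q, hq, hq1, hq2, hqp⟩
    exact Or.inr ⟨p, hp, hp1, hbid, hp2,
      (pvAny_iff pairs p).mpr ⟨q, hq, hq1.trans hp1.symm, hq2, hqp⟩⟩

-- the two flag computations agree on every bid
lemma pvFlag_eq (results : List (List (String × String))) (bid : String) :
    PySem.Set.contains
      (PySem.Set.ofList
        ((((results.foldl pvStepA PySem.Dict.empty).items.filter
            (fun p => PySem.Set.len p.2 > 1)).map (fun p => p.1)))) bid
    = PySem.Set.contains
        ((results.map pvNorm).foldl (pvStepB (results.map pvNorm)) PySem.Set.empty) bid := by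
  rw [Bool.eq_iff_iff, pvA_iff_conf, pvB_iff_conf]

-- zipping a list with its own map is a map
lemma pvZip_map {α β γ : Type} (l : List α) (f : α → β) (g : α × β → γ) :
    ((l.zip (l.map f)).map g) = l.map (fun x => g (x, f x)) := by
  induction l with
  | nil => rfl
  | cons x t ih => simp [ih]

-- ===== VERDICT (by name: the statement is the Claim_ definition above) =====
theorem add_review_flags_spec : Claim_equal_add_review_flags := by
  intro results _
  unfold Spec_add_review_flags add_review_flags add_review_flags_alt
  rw [pvZip_map]
  apply List.map_congr_left
  intro row _
  simp only [pvFlag_eq]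
  rfl
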